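-- pv_equiv track=rewrite | github.com/loomkoom/python-ess | O2_oefenzittingen/oefenzitting_8/O4_TwoDigitSum.py | sum_digits_recursive
-- ===== SOURCE A (Python) =====
-- def has_n_digits(number, digits = 2):
--     """
--     Returns true if the given number consists of exactly n digits,
--     otherwise return false.
--     """
--     nb_str = str(abs(number))
--
--     return len(nb_str) == digits
--
-- def digits(number):
--     number = abs(number)
--     seq = []
--     while number > 0:
--         seq.append(number % 10)
--         number //= 10
--     seq.reverse()
--     return seq
--
-- def sum_digits_recursive(seq):
--     """
--     Returns the sum of the digits of all two-digit numbers
--     in the given collection of numbers.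
--     """
--     if len(seq) == 0:
--         return 0
--
--     # if has_n_digits(seq[0], 2):
--     #     number = abs(seq[0])
--     #     digit_units = number % 10
--     #     digit_tens = number // 10
--     #     return digit_tens + digit_units + sum_digits_recursive(seq[1:])
--     # return sum_digits_recursive(seq[1:])
--
--     number = seq[0]
--     sum_next = sum_digits_recursive(seq[1:])
--     if has_n_digits(number, 2):
--         return sum(digits(number)) + sum_next
--     return sum_next
-- ===== SOURCE B (Python) =====
-- def sum_digits_recursive(seq):
--     """
--     Returns the sum of the digits of all two-digit numbers
--     in the given collection of numbers.
--     """
--     total = 0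
--     for number in seq:
--         m = abs(number)
--         if 10 <= m <= 99:
--             total += m // 10 + m % 10
--     return total
-- ===== Notes on version B (the rewrite author's own statement) =====
-- stated objective: faster
-- what changed: Replaced the recursion over seq[1:] slices and the string/list digit helpers with one arithmetic loop: a number is two-digit iff 10 <= abs(n) <= 99, and its digit sum is abs(n)//10 + abs(n)%10, so no str() conversion and no digit-list construction is needed.
import Mathlib
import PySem

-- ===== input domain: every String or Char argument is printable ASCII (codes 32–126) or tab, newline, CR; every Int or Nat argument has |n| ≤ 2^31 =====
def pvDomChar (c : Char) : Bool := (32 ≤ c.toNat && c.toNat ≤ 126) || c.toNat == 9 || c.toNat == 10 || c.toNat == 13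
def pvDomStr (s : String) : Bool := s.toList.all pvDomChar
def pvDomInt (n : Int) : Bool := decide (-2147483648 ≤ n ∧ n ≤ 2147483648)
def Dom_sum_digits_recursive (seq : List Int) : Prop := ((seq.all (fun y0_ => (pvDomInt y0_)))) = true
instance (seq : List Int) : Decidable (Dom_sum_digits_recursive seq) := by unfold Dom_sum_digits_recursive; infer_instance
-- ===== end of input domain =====

-- B replaces the recursion over seq[1:] slices and the string/digit-list helpers with one
-- arithmetic pass (two-digit test 10 ≤ |n| ≤ 99, digit sum |n|//10 + |n|%10); faster.

-- ===== PORT A =====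
-- helper of A: has_n_digits(number, digits) — str(abs(number)) compared against digits
def pyHasNDigits (number : Int) (digits : Int) : Bool :=
  let nb_str := PySem.Int.toStr (((number.natAbs : Int)))
  decide ((PySem.Str.len nb_str : Int) = digits)

-- helper of A: digits(number) — while number > 0: append number % 10; number //= 10; reverse
def pyDigitsLoop (number : Int) (seq : List Int) : List Int :=
  if _h : 0 < number then
    pyDigitsLoop (PySem.Int.floordiv number 10) (seq ++ [PySem.Int.mod number 10])
  else
    seq
termination_by number.toNat
decreasing_by
  have h10 : PySem.Int.floordiv number 10 = number / 10 :=
    PySem.Int.floordiv_eq_ediv_of_pos (by omega)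
  rw [h10]; omega

def pyDigits (number : Int) : List Int :=
  (pyDigitsLoop (((number.natAbs : Int))) []).reverse

def sum_digits_recursive (seq : List Int) : Int :=
  match seq with
  | [] => 0
  | number :: rest =>
    let sum_next := sum_digits_recursive rest
    if pyHasNDigits number 2 then (pyDigits number).sum + sum_next
    else sum_next

-- ===== PORT B =====
-- B: single arithmetic pass; m = abs(number); two-digit iff 10 <= m <= 99; adds m//10 + m%10.
def sum_digits_recursive_alt (seq : List Int) : Int :=
  seq.foldl (fun total number =>
    let m : Int := ((number.natAbs : Int))
    if 10 ≤ m ∧ m ≤ 99 then total + (PySem.Int.floordiv m 10 + PySem.Int.mod m 10)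
    else total) 0

-- ===== PRECONDITION & SPEC =====
def Spec_sum_digits_recursive (seq : List Int) (out : Int) : Prop := out = sum_digits_recursive_alt seq
instance (seq : List Int) (out : Int) : Decidable (Spec_sum_digits_recursive seq out) := by unfold Spec_sum_digits_recursive; infer_instance

-- ===== CLAIM (what is proved, stated in full; the proofs are below) =====
def Claim_equal_sum_digits_recursive : Prop := ∀ (seq : List Int), Dom_sum_digits_recursive seq → Spec_sum_digits_recursive seq (sum_digits_recursive seq)

-- ===== LEMMAS AND PROOFS =====

-- length of Nat.toDigitsCore is at least the length of its accumulator
theorem tdc_len_ge (b : Nat) : ∀ (f n : Nat) (l : List Char),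
    l.length ≤ (Nat.toDigitsCore b f n l).length := by
  intro f
  induction f with
  | zero => intro n l; simp [Nat.toDigitsCore]
  | succ f ih =>
    intro n l
    simp only [Nat.toDigitsCore]
    split
    · simp
    · exact le_trans (by simp) (ih _ _)

-- with positive fuel, toDigitsCore produces at least one more char than the accumulator
theorem tdc_len_succ (b f n : Nat) (l : List Char) (hf : 0 < f) :
    l.length + 1 ≤ (Nat.toDigitsCore b f n l).length := by
  obtain ⟨f, rfl⟩ : ∃ f', f = f' + 1 := ⟨f - 1, by omega⟩
  simp only [Nat.toDigitsCore]
  split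
  · simp
  · exact le_trans (by simp) (tdc_len_ge b f (n / b) _)

theorem toDigits_len_lt10 (k : Nat) (h : k < 10) :
    (Nat.toDigits 10 k).length = 1 := by
  have hd : k / 10 = 0 := Nat.div_eq_of_lt h
  simp [Nat.toDigits, Nat.toDigitsCore, hd]

theorem toDigits_len_two (k : Nat) (h1 : 10 ≤ k) (h2 : k < 100) :
    (Nat.toDigits 10 k).length = 2 := by
  have hd1 : ¬ (k / 10 = 0) := by omega
  have hd2 : k / 10 / 10 = 0 := by omega
  obtain ⟨f, rfl⟩ : ∃ f', k = f' + 1 := ⟨k - 1, by omega⟩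
  unfold Nat.toDigits
  simp only [Nat.toDigitsCore, if_neg hd1]
  simp [hd2]

theorem toDigits_len_ge3 (k : Nat) (h : 100 ≤ k) :
    3 ≤ (Nat.toDigits 10 k).length := by
  have hd1 : ¬ (k / 10 = 0) := by omega
  have hd2 : ¬ (k / 10 / 10 = 0) := by omega
  unfold Nat.toDigits
  rw [show k + 1 = k + 1 - 1 + 1 from by omega]
  simp only [Nat.toDigitsCore, if_neg hd1]
  rw [show k + 1 - 1 = (k - 1) + 1 from by omega]
  simp only [Nat.toDigitsCore, if_neg hd2]
  have := tdc_len_succ 10 (k - 1) (k / 10 / 10)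
      (Nat.digitChar (k / 10 % 10) :: [Nat.digitChar (k % 10)]) (by omega)
  simpa using this

-- A's string-length two-digit test is the arithmetic range test
theorem hasnd_eq (n : Int) :
    pyHasNDigits n 2 = decide (10 ≤ n.natAbs ∧ n.natAbs ≤ 99) := by
  have hlen : PySem.Str.len (PySem.Int.toStr ((n.natAbs : Int)))
      = ((Nat.toDigits 10 n.natAbs).length : Int) := by
    rw [PySem.Str.len_eq, PySem.Int.toList_toStr]
    simp only [PySem.Int.toChars]
    rw [if_neg (by omega : ¬ ((n.natAbs : Int) < 0)), Int.toNat_natCast]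
  show decide (PySem.Str.len (PySem.Int.toStr (((n.natAbs : Int)))) = 2)
      = decide (10 ≤ n.natAbs ∧ n.natAbs ≤ 99)
  rw [hlen]
  rcases Nat.lt_or_ge n.natAbs 10 with h10 | h10
  · rw [toDigits_len_lt10 n.natAbs h10]
    have hn : ¬ (10 ≤ n.natAbs ∧ n.natAbs ≤ 99) := by omega
    simp [hn]
  · rcases Nat.lt_or_ge n.natAbs 100 with h100 | h100
    · rw [toDigits_len_two n.natAbs h10 h100]
      have hy : 10 ≤ n.natAbs ∧ n.natAbs ≤ 99 := by omega
      simp [hy]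
    · have h3 := toDigits_len_ge3 n.natAbs h100
      have hn : ¬ (10 ≤ n.natAbs ∧ n.natAbs ≤ 99) := by omega
      have hne : ¬ (((Nat.toDigits 10 n.natAbs).length : Int) = 2) := by omega
      simp [hn, hne]

-- digit sum of a two-digit number: tens + units
theorem pyDigits_sum_two (n : Int) (h1 : 10 ≤ n.natAbs) (h2 : n.natAbs ≤ 99) :
    (pyDigits n).sum
      = PySem.Int.floordiv (((n.natAbs : Int))) 10 + PySem.Int.mod (((n.natAbs : Int))) 10 := by
  have hm1 : (10 : Int) ≤ ((n.natAbs : Int)) := by omega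
  have hm2 : ((n.natAbs : Int)) ≤ 99 := by omega
  have hfd : PySem.Int.floordiv (((n.natAbs : Int))) 10 = ((n.natAbs : Int)) / 10 :=
    PySem.Int.floordiv_eq_ediv_of_pos (by omega)
  have hmd : PySem.Int.mod (((n.natAbs : Int))) 10 = ((n.natAbs : Int)) % 10 :=
    PySem.Int.mod_eq_emod_of_pos (by omega)
  have hfd2 : PySem.Int.floordiv (((n.natAbs : Int)) / 10) 10
      = ((n.natAbs : Int)) / 10 / 10 := PySem.Int.floordiv_eq_ediv_of_pos (by omega)
  have hmd2 : PySem.Int.mod (((n.natAbs : Int)) / 10) 10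
      = ((n.natAbs : Int)) / 10 % 10 := PySem.Int.mod_eq_emod_of_pos (by omega)
  have hq2 : ((n.natAbs : Int)) / 10 / 10 = 0 := by omega
  have hq3 : ((n.natAbs : Int)) / 10 % 10 = ((n.natAbs : Int)) / 10 := by omega
  unfold pyDigits
  rw [pyDigitsLoop, dif_pos (by omega : (0:Int) < ((n.natAbs : Int))), hfd, hmd]
  rw [pyDigitsLoop, dif_pos (by omega : (0:Int) < ((n.natAbs : Int)) / 10), hfd2, hmd2, hq2, hq3]
  rw [pyDigitsLoop, dif_neg (by omega : ¬ (0:Int) < 0)]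
  simp only [List.nil_append, List.cons_append, List.reverse_cons, List.reverse_nil,
    List.sum_cons, List.sum_nil]
  omega

-- per-element agreement of the two programs' contributions
theorem step_eq (x : Int) :
    (if pyHasNDigits x 2 then (pyDigits x).sum else 0)
      = (if 10 ≤ (((x.natAbs : Int))) ∧ (((x.natAbs : Int))) ≤ 99
          then PySem.Int.floordiv (((x.natAbs : Int))) 10 + PySem.Int.mod (((x.natAbs : Int))) 10
          else 0) := by
  rw [hasnd_eq]
  by_cases h : 10 ≤ x.natAbs ∧ x.natAbs ≤ 99
  · rw [if_pos (by simpa using h),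
      if_pos (by omega : 10 ≤ (((x.natAbs : Int))) ∧ (((x.natAbs : Int))) ≤ 99)]
    exact pyDigits_sum_two x h.1 h.2
  · rw [if_neg (by simpa using h),
      if_neg (by omega : ¬ (10 ≤ (((x.natAbs : Int))) ∧ (((x.natAbs : Int))) ≤ 99))]

theorem foldl_eq_sum (seq : List Int) (t : Int) :
    seq.foldl (fun total number =>
      let m : Int := ((number.natAbs : Int))
      if 10 ≤ m ∧ m ≤ 99 then total + (PySem.Int.floordiv m 10 + PySem.Int.mod m 10)
      else total) t
      = t + sum_digits_recursive seq := by
  induction seq generalizing t with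
  | nil => simp [sum_digits_recursive]
  | cons x xs ih =>
    have h := step_eq x
    rw [List.foldl_cons]
    show List.foldl _
        (if 10 ≤ (((x.natAbs : Int))) ∧ (((x.natAbs : Int))) ≤ 99
          then t + (PySem.Int.floordiv (((x.natAbs : Int))) 10
            + PySem.Int.mod (((x.natAbs : Int))) 10)
          else t) xs
      = t + sum_digits_recursive (x :: xs)
    simp only [sum_digits_recursive]
    split_ifs at h ⊢ <;> rw [ih] <;> omega

-- ===== VERDICT =====
theorem sum_digits_recursive_spec : Claim_equal_sum_digits_recursive := by
  intro seq _
  unfold Spec_sum_digits_recursive sum_digits_recursive_alt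
  rw [foldl_eq_sum]
  ring
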